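-- pv_equiv track=rewrite | github.com/trace86/jhu-aai | AlphaToe/state_mapping/mapping_old.py | vertical_down_search
-- ===== SOURCE A (Python) =====
-- def vertical_down_search(i, j, matrix, num_neighbors, symbol):
--     min_i = 0
--     min_j = 0
--     max_i = len(matrix) - 1
--     max_j = len(matrix[0]) - 1
--
--     xs = []
--     for n in range(1, num_neighbors + 1):
--         _i = i + n
--         _j = j
--         if _i >= min_i and _j >= min_j and _i <= max_i and _j <= max_j:
--             xs.append(matrix[_i][_j])
--     if len(xs) != num_neighbors:
--         return False
--     return all(item == symbol for item in xs)
-- ===== SOURCE B (Python) =====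
-- def vertical_down_search(i, j, matrix, num_neighbors, symbol):
--     rows = len(matrix)
--     cols = len(matrix[0])
--     lo = max(i + 1, 0)
--     hi = min(i + num_neighbors, rows - 1)
--     in_bounds = max(hi - lo + 1, 0) if 0 <= j < cols else 0
--     if in_bounds != num_neighbors:
--         return False
--     return all(matrix[r][j] == symbol for r in range(lo, hi + 1))
-- ===== Notes on version B (the rewrite author's own statement) =====
-- stated objective: simpler
-- what changed: Replaces A's build-a-list-with-a-filtering-loop-then-compare-its-length scheme by a closed-form count of the in-bounds part of the run (clipping the row interval with max/min) followed by a single all(...) over those cells; Pre_ excludes only the inputs where A raises IndexError (empty matrix, or a ragged matrix where an accessed row is shorter than row 0).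
import Mathlib
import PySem

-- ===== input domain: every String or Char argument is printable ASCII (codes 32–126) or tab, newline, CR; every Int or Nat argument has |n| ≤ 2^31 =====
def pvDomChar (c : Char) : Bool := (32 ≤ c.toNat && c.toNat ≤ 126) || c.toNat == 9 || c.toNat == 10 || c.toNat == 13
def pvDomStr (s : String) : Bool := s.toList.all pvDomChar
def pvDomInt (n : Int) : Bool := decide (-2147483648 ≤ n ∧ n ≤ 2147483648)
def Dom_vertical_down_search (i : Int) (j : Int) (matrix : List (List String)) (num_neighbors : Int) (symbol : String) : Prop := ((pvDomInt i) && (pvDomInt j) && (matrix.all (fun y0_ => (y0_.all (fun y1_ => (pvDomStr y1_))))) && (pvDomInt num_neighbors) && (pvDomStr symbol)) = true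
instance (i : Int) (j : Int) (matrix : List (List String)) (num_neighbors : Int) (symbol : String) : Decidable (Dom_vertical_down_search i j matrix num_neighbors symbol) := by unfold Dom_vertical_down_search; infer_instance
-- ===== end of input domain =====

-- B replaces A's build-a-list-then-compare-its-length loop by a closed-form count of
-- the in-bounds part of the downward run (clipping the row interval with max/min)
-- followed by one all(...) over those cells (objective: simpler).

-- ===== PORT A =====
def vertical_down_search (i : Int) (j : Int) (matrix : List (List String)) (num_neighbors : Int) (symbol : String) : Bool :=
  let min_i : Int := 0
  let min_j : Int := 0
  let max_i : Int := (matrix.length : Int) - 1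
  let max_j : Int := ((matrix.headD []).length : Int) - 1
  let xs : List String := (PySem.List.pyRange 1 (num_neighbors + 1) 1).foldl
    (fun acc n =>
      let _i := i + n
      let _j := j
      if _i ≥ min_i ∧ _j ≥ min_j ∧ _i ≤ max_i ∧ _j ≤ max_j then
        acc ++ [PySem.List.pyGetD (PySem.List.pyGetD matrix _i []) _j ""]
      else acc) []
  if (xs.length : Int) ≠ num_neighbors then false
  else xs.all (fun item => item == symbol)

-- ===== PORT B =====
def vertical_down_search_alt (i : Int) (j : Int) (matrix : List (List String)) (num_neighbors : Int) (symbol : String) : Bool :=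
  let rows : Int := matrix.length
  let cols : Int := ((matrix.headD []).length : Int)
  let lo : Int := max (i + 1) 0
  let hi : Int := min (i + num_neighbors) (rows - 1)
  let in_bounds : Int := if 0 ≤ j ∧ j < cols then max (hi - lo + 1) 0 else 0
  if in_bounds ≠ num_neighbors then false
  else (PySem.List.pyRange lo (hi + 1) 1).all
    (fun r => PySem.List.pyGetD (PySem.List.pyGetD matrix r []) j "" == symbol)

-- ===== PRECONDITION & SPEC =====
-- Pre_ excludes exactly the inputs where the Python A raises IndexError: the empty
-- matrix (matrix[0]), and ragged matrices where some accessed row i+n passes the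
-- bounds test (taken against row 0's length) but is itself shorter than j+1.
def Pre_vertical_down_search (i : Int) (j : Int) (matrix : List (List String)) (num_neighbors : Int) (symbol : String) : Prop :=
  matrix ≠ [] ∧
  ∀ k ∈ List.range matrix.length,
    (1 ≤ (k : Int) - i ∧ (k : Int) - i ≤ num_neighbors ∧ 0 ≤ j ∧ j ≤ ((matrix.headD []).length : Int) - 1) →
    j < ((matrix.getD k []).length : Int)
instance (i : Int) (j : Int) (matrix : List (List String)) (num_neighbors : Int) (symbol : String) : Decidable (Pre_vertical_down_search i j matrix num_neighbors symbol) := by unfold Pre_vertical_down_search; infer_instance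

def pvWitness_vertical_down_search : Int × Int × List (List String) × Int × String := (0, 0, [["x"], ["x"]], 1, "x")

def Spec_vertical_down_search (i : Int) (j : Int) (matrix : List (List String)) (num_neighbors : Int) (symbol : String) (out : Bool) : Prop := out = vertical_down_search_alt i j matrix num_neighbors symbol
instance (i : Int) (j : Int) (matrix : List (List String)) (num_neighbors : Int) (symbol : String) (out : Bool) : Decidable (Spec_vertical_down_search i j matrix num_neighbors symbol out) := by unfold Spec_vertical_down_search; infer_instance

-- ===== CLAIM (what is proved, stated in full; the proofs are below) =====
def Claim_equal_vertical_down_search : Prop := ∀ (i : Int) (j : Int) (matrix : List (List String)) (num_neighbors : Int) (symbol : String), Dom_vertical_down_search i j matrix num_neighbors symbol → Pre_vertical_down_search i j matrix num_neighbors symbol → Spec_vertical_down_search i j matrix num_neighbors symbol (vertical_down_search i j matrix num_neighbors symbol)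

-- ===== LEMMAS AND PROOFS =====

theorem vdsearch_eq (i : Int) (j : Int) (matrix : List (List String)) (num_neighbors : Int) (symbol : String) :
    vertical_down_search i j matrix num_neighbors symbol = vertical_down_search_alt i j matrix num_neighbors symbol := by
  unfold vertical_down_search vertical_down_search_alt
  simp only []
  set rows : Int := (matrix.length : Int) with hrows
  set cols : Int := ((matrix.headD []).length : Int) with hcols
  have hrows0 : 0 ≤ rows := by positivity
  have hcols0 : 0 ≤ cols := by positivity
  set f : Int → String := fun n => PySem.List.pyGetD (PySem.List.pyGetD matrix (i + n) []) j "" with hf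
  set R : List Int := PySem.List.pyRange 1 (num_neighbors + 1) 1 with hR
  have hfold : R.foldl
      (fun acc n => if i + n ≥ 0 ∧ j ≥ 0 ∧ i + n ≤ rows - 1 ∧ j ≤ cols - 1 then
        acc ++ [PySem.List.pyGetD (PySem.List.pyGetD matrix (i + n) []) j ""] else acc) [] =
      [] ++ (R.filter (fun n => decide (i + n ≥ 0 ∧ j ≥ 0 ∧ i + n ≤ rows - 1 ∧ j ≤ cols - 1))).map f :=
    PySem.List.foldl_append_ite _ _ _ _
  rw [hfold]
  simp only [List.nil_append]
  have hlenR : R.length = num_neighbors.toNat := by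
    rw [hR, PySem.List.length_pyRange_one]; omega
  by_cases hneg : num_neighbors < 0
  · have hRnil : R = [] := by rw [hR]; exact PySem.List.pyRange_one_eq_nil (by omega)
    rw [hRnil]
    have hib : (if 0 ≤ j ∧ j < cols then max (min (i + num_neighbors) (rows - 1) - max (i + 1) 0 + 1) 0 else 0) ≠ num_neighbors := by
      split_ifs <;> omega
    simp [hib]
    omega
  · by_cases hzero : num_neighbors = 0
    · subst hzero
      have hRnil : R = [] := by rw [hR]; exact PySem.List.pyRange_one_eq_nil (by omega)
      have hib : (if 0 ≤ j ∧ j < cols then max (min (i + 0) (rows - 1) - max (i + 1) 0 + 1) 0 else 0) = 0 := by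
        split_ifs <;> omega
      rw [hRnil]
      have hBnil : PySem.List.pyRange (max (i + 1) 0) (min (i + 0) (rows - 1) + 1) 1 = [] :=
        PySem.List.pyRange_one_eq_nil (by omega)
      rw [hBnil] at *
      simp [hib]
    · have hpos : 0 < num_neighbors := by omega
      by_cases hP : 0 ≤ j ∧ j ≤ cols - 1 ∧ 0 ≤ i + 1 ∧ i + num_neighbors ≤ rows - 1
      · -- whole run in bounds: A's filter keeps everything, B's clipped interval is the run
        have hfilter : R.filter (fun n => decide (i + n ≥ 0 ∧ j ≥ 0 ∧ i + n ≤ rows - 1 ∧ j ≤ cols - 1)) = R := by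
          apply List.filter_eq_self.mpr
          intro n hn
          have hmem := (PySem.List.mem_pyRange_one).mp (hR ▸ hn)
          simp only [decide_eq_true_eq]
          exact ⟨by omega, by omega, by omega, by omega⟩
        rw [hfilter]
        have hlen : ((R.map f).length : Int) = num_neighbors := by
          simp [hlenR]; omega
        have hlo : max (i + 1) 0 = i + 1 := by omega
        have hhi : min (i + num_neighbors) (rows - 1) = i + num_neighbors := by omega
        have hib : (if 0 ≤ j ∧ j < cols then max (min (i + num_neighbors) (rows - 1) - max (i + 1) 0 + 1) 0 else 0) = num_neighbors := by
          split_ifs <;> omega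
        rw [hib]
        simp only [hlen, if_neg (by omega : ¬ (num_neighbors ≠ num_neighbors)), hlo, hhi]
        rw [List.all_map, hR, PySem.List.pyRange_one, PySem.List.pyRange_one, List.all_map, List.all_map]
        congr 1
        · congr 1
          omega
        · funext k
          have hk : i + (1 + (k : Int)) = i + 1 + (k : Int) := by ring
          simp [hf, hk]
      · -- some cell out of bounds: A's list is too short, B's clipped count ≠ num_neighbors
        have hex : ∃ n ∈ R, ¬ (i + n ≥ 0 ∧ j ≥ 0 ∧ i + n ≤ rows - 1 ∧ j ≤ cols - 1) := by
          rcases not_and_or.mp hP with h | h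
          · exact ⟨1, (PySem.List.mem_pyRange_one).mpr ⟨le_refl 1, by omega⟩, by omega⟩
          rcases not_and_or.mp h with h | h
          · exact ⟨1, (PySem.List.mem_pyRange_one).mpr ⟨le_refl 1, by omega⟩, by omega⟩
          rcases not_and_or.mp h with h | h
          · exact ⟨1, (PySem.List.mem_pyRange_one).mpr ⟨le_refl 1, by omega⟩, by omega⟩
          · exact ⟨num_neighbors, (PySem.List.mem_pyRange_one).mpr ⟨by omega, by omega⟩, by omega⟩
        have hlt : (R.filter (fun n => decide (i + n ≥ 0 ∧ j ≥ 0 ∧ i + n ≤ rows - 1 ∧ j ≤ cols - 1))).length < R.length := by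
          obtain ⟨n, hn, hnc⟩ := hex
          exact List.length_filter_lt_length_iff_exists.mpr ⟨n, hn, by simpa using hnc⟩
        have hne : (((R.filter (fun n => decide (i + n ≥ 0 ∧ j ≥ 0 ∧ i + n ≤ rows - 1 ∧ j ≤ cols - 1))).map f).length : Int) ≠ num_neighbors := by
          simp only [List.length_map]
          omega
        have hib : (if 0 ≤ j ∧ j < cols then max (min (i + num_neighbors) (rows - 1) - max (i + 1) 0 + 1) 0 else 0) ≠ num_neighbors := by
          split_ifs with h <;> omega
        rw [if_pos hne, if_pos hib]

-- ===== VERDICT (by name: the statement is the Claim_ definition above) =====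
theorem vertical_down_search_spec : Claim_equal_vertical_down_search := by
  intro i j matrix num_neighbors symbol _ _
  exact vdsearch_eq i j matrix num_neighbors symbol
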